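-- pv_equiv track=rewrite | github.com/vladcheck/university-materials | 3С/Дискра/КР1/2/main.py | generate_hamming_table_for_encoding
-- ===== SOURCE A (Python) =====
-- from typing import List, Tuple
--
-- def generate_hamming_table_for_encoding(k: int, r: int) -> List[List[int]]:
--     """
--     Генерирует таблицу Хемминга для вычисления синдрома/проверочных битов.
--     Каждая строка соответствует одному проверочному биту P_i.
--     Каждый столбец соответствует позиции в кодовом слове (1-индексированной).
--     Значение 1 означает, что проверочный бит P_i влияет на бит в этой позиции.
--     """
--     n = k + r
--     actual_m = (n - 1).bit_length()
--     if actual_m > r: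
--         actual_m = r
--
--     table = []
--     for i in range(actual_m):
--         row = []
--         for j in range(1, n + 1):
--             if j & (1 << i):
--                 row.append(1)
--             else:
--                 row.append(0)
--         table.append(row)
--
--     return table
-- ===== SOURCE B (Python) =====
-- from typing import List
--
-- def generate_hamming_table_for_encoding(k: int, r: int) -> List[List[int]]:
--     n = k + r
--     m = (n - 1).bit_length()
--     if m > r:
--         m = r
--     if n <= 0:
--         return [[] for _ in range(m)]
--     table = []
--     for i in range(m):
--         half = 1 << i
--         block = [0] * half + [1] * half
--         reps = n // (2 * half) + 2
--         table.append((block * reps)[1:n + 1])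
--     return table
-- ===== Notes on version B (the rewrite author's own statement) =====
-- stated objective: faster
-- what changed: Instead of testing bit i of every 1-indexed position j with j & (1 << i), B exploits the row's periodicity: it builds the length-2^(i+1) block [0]*2^i + [1]*2^i once, replicates it with list multiplication and slices [1:n+1] to align with 1-indexed positions.
import Mathlib
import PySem

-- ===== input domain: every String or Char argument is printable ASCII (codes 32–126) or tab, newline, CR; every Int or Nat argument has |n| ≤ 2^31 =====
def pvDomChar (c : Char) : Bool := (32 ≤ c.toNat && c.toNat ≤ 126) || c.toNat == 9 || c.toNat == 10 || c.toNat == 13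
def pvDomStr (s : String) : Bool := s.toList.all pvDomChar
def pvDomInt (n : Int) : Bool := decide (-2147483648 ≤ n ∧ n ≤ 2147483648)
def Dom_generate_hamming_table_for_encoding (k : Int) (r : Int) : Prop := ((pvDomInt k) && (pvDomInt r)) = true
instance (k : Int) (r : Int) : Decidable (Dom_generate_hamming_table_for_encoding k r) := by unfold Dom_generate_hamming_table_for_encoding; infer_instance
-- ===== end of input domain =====

-- B builds each parity row by tiling the periodic 0^h 1^h block (bulk list replication)
-- and slicing, instead of testing bit i of every position j (constant-factor faster).

-- ===== PORT A =====
-- literal transliteration of Source A: per position j, test j & (1 << i)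
def generate_hamming_table_for_encoding (k : Int) (r : Int) : List (List Int) :=
  let n := k + r
  let m0 : Int := (PySem.Int.bitLength (n - 1) : Int)
  let actual_m := if m0 > r then r else m0
  (PySem.List.pyRange 0 actual_m 1).map (fun i =>
    (PySem.List.pyRange 1 (n + 1) 1).map (fun j =>
      if PySem.Int.band j ((1 <<< i.toNat : Nat) : Int) ≠ 0 then (1 : Int) else 0))

-- ===== PORT B =====
-- literal transliteration of Source B: tile the block [0]*half + [1]*half and slice [1:width+1]
def generate_hamming_table_for_encoding_alt (k : Int) (r : Int) : List (List Int) :=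
  let n := k + r
  let m0 : Int := (PySem.Int.bitLength (n - 1) : Int)
  let m := if m0 > r then r else m0
  if n ≤ 0 then (PySem.List.pyRange 0 m 1).map (fun _ => []) else
  (PySem.List.pyRange 0 m 1).map (fun i =>
    let half : Nat := 1 <<< i.toNat
    let block := List.replicate half (0 : Int) ++ List.replicate half 1
    let reps := (PySem.Int.floordiv n (2 * (half : Int)) + 2).toNat
    PySem.List.slice (List.flatten (List.replicate reps block)) (some 1) (some (n + 1)))

-- ===== PRECONDITION & SPEC =====
def Spec_generate_hamming_table_for_encoding (k : Int) (r : Int) (out : List (List Int)) : Prop := out = generate_hamming_table_for_encoding_alt k r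
instance (k : Int) (r : Int) (out : List (List Int)) : Decidable (Spec_generate_hamming_table_for_encoding k r out) := by unfold Spec_generate_hamming_table_for_encoding; infer_instance

-- ===== CLAIM (what is proved, stated in full; the proofs are below) =====
def Claim_equal_generate_hamming_table_for_encoding : Prop := ∀ (k : Int) (r : Int), Dom_generate_hamming_table_for_encoding k r → Spec_generate_hamming_table_for_encoding k r (generate_hamming_table_for_encoding k r)

-- ===== LEMMAS AND PROOFS =====

lemma pv_len_tiled (R : Nat) (l : List Int) :
    (List.flatten (List.replicate R l)).length = R * l.length := by
  induction R with
  | zero => simp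
  | succ R ih => simp [List.replicate_succ, ih, Nat.succ_mul]; ring

lemma pv_tiled_get (h : Nat) (hh : 0 < h) :
    ∀ (R t : Nat), t < R * (2 * h) →
    (List.flatten (List.replicate R (List.replicate h (0 : Int) ++ List.replicate h 1)))[t]?
      = some (if t / h % 2 = 1 then 1 else 0) := by
  intro R
  induction R with
  | zero => intro t ht; omega
  | succ R ih =>
    intro t ht
    rw [List.replicate_succ, List.flatten_cons]
    have hlen : (List.replicate h (0 : Int) ++ List.replicate h 1).length = h + h := by
      simp
    by_cases h2 : t < h + h
    · rw [List.getElem?_append_left (by rw [hlen]; omega)]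
      by_cases h1 : t < h
      · rw [List.getElem?_append_left (by rw [List.length_replicate]; omega)]
        simp [h1, Nat.div_eq_of_lt h1]
      · rw [List.getElem?_append_right (by rw [List.length_replicate]; omega)]
        have hq : t / h = 1 := Nat.div_eq_of_lt_le (by omega) (by omega)
        rw [List.length_replicate, List.getElem?_replicate_of_lt (by omega), hq]
        norm_num
    · rw [List.getElem?_append_right (by rw [hlen]; omega)]
      rw [hlen]
      have hmul : (R + 1) * (2 * h) = R * (2 * h) + (h + h) := by ring
      rw [ih (t - (h + h)) (by omega)]
      have hsub : (t - (h + h)) / h = t / h - 2 := by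
        have := Nat.sub_mul_div t h 2
        rw [show h * 2 = h + h from by ring] at this
        exact this
      have hq2 : 2 ≤ t / h := by
        rw [Nat.le_div_iff_mul_le hh]; omega
      rw [hsub]
      have heq : (t / h - 2) % 2 = t / h % 2 := by omega
      rw [heq]


lemma pv_row_eq (n : Int) (b : Nat) (hn : 0 < n) :
    (PySem.List.pyRange 1 (n + 1) 1).map (fun j =>
        if PySem.Int.band j ((1 <<< b : Nat) : Int) ≠ 0 then (1 : Int) else 0)
      = PySem.List.slice
          (List.flatten (List.replicate
            ((PySem.Int.floordiv n ((2 : Int) * ((1 <<< b : Nat) : Int)) + 2).toNat)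
            (List.replicate (1 <<< b) (0 : Int) ++ List.replicate (1 <<< b) 1)))
          (some 1) (some (n + 1)) := by
  have hpow : (1 <<< b : Nat) = 2 ^ b := Nat.one_shiftLeft b
  set h : Nat := 1 <<< b with hh
  have hhpos : 0 < h := by rw [hpow]; positivity
  set N : Nat := n.toNat with hN
  have hnN : n = (N : Int) := by omega
  -- reps
  have hfd : PySem.Int.floordiv n ((2 : Int) * (h : Int)) = ((N / (2 * h) : Nat) : Int) := by
    rw [hnN, show ((2 : Int) * (h : Int)) = ((2 * h : Nat) : Int) from by push_cast; ring]
    exact PySem.Int.floordiv_natCast N (2 * h)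
  have hreps : (PySem.Int.floordiv n ((2 : Int) * (h : Int)) + 2).toNat = N / (2 * h) + 2 := by
    rw [hfd, show ((N / (2 * h) : Nat) : Int) + 2 = ((N / (2 * h) + 2 : Nat) : Int) from by push_cast; ring]
    exact Int.toNat_natCast _
  rw [hreps]
  set R : Nat := N / (2 * h) + 2 with hR
  set T : List Int := List.flatten (List.replicate R (List.replicate h (0 : Int) ++ List.replicate h 1)) with hT
  have hTlen : T.length = R * (2 * h) := by
    rw [hT, pv_len_tiled]; simp; ring
  have hNlt : N + 1 < R * (2 * h) := by
    have e1 := Nat.div_add_mod N (2 * h)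
    have e2 : N % (2 * h) < 2 * h := Nat.mod_lt _ (by omega)
    have e3 : R * (2 * h) = 2 * h * (N / (2 * h)) + (2 * h + 2 * h) := by rw [hR]; ring
    omega
  rw [PySem.List.slice_toNat _ (by norm_num) (by omega)]
  have htk : (n + 1).toNat - (1 : Int).toNat = N := by omega
  rw [htk]
  apply List.ext_getElem?
  intro t
  by_cases hlt : t < N
  · -- both sides give the bit value of position t+1
    rw [List.getElem?_map]
    rw [PySem.List.getElem?_pyRange_one]
    have hrange : t < (n + 1 - 1).toNat := by omega
    simp only [hrange, if_pos]
    rw [List.getElem?_take]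
    simp only [hlt, if_pos]
    rw [List.getElem?_drop, show (1 : Int).toNat = 1 from rfl]
    rw [hT, pv_tiled_get h hhpos R (1 + t) (by omega)]
    -- now compute the band condition
    have hj : (1 : Int) + t = ((t + 1 : Nat) : Int) := by push_cast; ring
    simp only [Option.map_some]
    rw [hj, show ((1 <<< b : Nat) : Int) = ((2 ^ b : Nat) : Int) from by rw [Nat.one_shiftLeft], PySem.Int.band_natCast]
    have hb : ((((t + 1) &&& 2 ^ b : Nat)) : Int) ≠ 0 ↔ (t + 1) / h % 2 = 1 := by
      rw [hpow]
      rw [Nat.and_two_pow]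
      rcases hbit : (t + 1).testBit b with _ | _
      · rw [Nat.testBit_eq_decide_div_mod_eq] at hbit
        simp at hbit ⊢
        omega
      · rw [Nat.testBit_eq_decide_div_mod_eq] at hbit
        simp at hbit ⊢
        omega
    have haddc : 1 + t = t + 1 := by omega
    rw [haddc]
    by_cases hc : (t + 1) / h % 2 = 1
    · rw [if_pos (hb.mpr hc), if_pos hc]
    · rw [if_neg (fun hx => hc (hb.mp hx)), if_neg hc]
  · -- both out of range
    rw [List.getElem?_eq_none, List.getElem?_eq_none]
    · simp only [List.length_take, List.length_drop, hTlen]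
      omega
    · simp only [List.length_map, PySem.List.length_pyRange_one]
      omega

-- ===== VERDICT (by name: the statement is the Claim_ definition above) =====
theorem generate_hamming_table_for_encoding_spec : Claim_equal_generate_hamming_table_for_encoding := by
  intro k r _
  unfold Spec_generate_hamming_table_for_encoding
  unfold generate_hamming_table_for_encoding generate_hamming_table_for_encoding_alt
  by_cases hn : k + r ≤ 0
  · rw [if_pos hn]
    apply List.map_congr_left
    intro i _
    rw [PySem.List.pyRange_one_eq_nil (by omega)]
    simp
  · rw [if_neg hn]
    apply List.map_congr_left
    intro i _
    exact pv_row_eq (k + r) i.toNat (by omega)
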